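-- pv_equiv track=rewrite | github.com/5Regina5/auto-drive | code/build_llm_prompts_folder.py | motion_state
-- ===== SOURCE A (Python) =====
-- def motion_state(attributes):
--     if not attributes:
--         return "parked"
--     atts = set(a.lower() for a in attributes)
--     if "vehicle.moving" in atts: return "moving"
--     if "vehicle.stopped" in atts: return "stopped"
--     if "vehicle.parked" in atts: return "parked"
--     if "cycle.with_rider" in atts: return "with_rider"
--     if "cycle.without_rider" in atts: return "without_rider"
--     if "pedestrian.moving" in atts: return "moving"
--     if "pedestrian.sitting_lying_down" in atts: return "sitting_lying_down"
--     if "pedestrian.standing" in atts: return "standing"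
--     return "other"
-- ===== SOURCE B (Python) =====
-- _RANKS = {
--     "vehicle.moving": (0, "moving"),
--     "vehicle.stopped": (1, "stopped"),
--     "vehicle.parked": (2, "parked"),
--     "cycle.with_rider": (3, "with_rider"),
--     "cycle.without_rider": (4, "without_rider"),
--     "pedestrian.moving": (5, "moving"),
--     "pedestrian.sitting_lying_down": (6, "sitting_lying_down"),
--     "pedestrian.standing": (7, "standing"),
-- }
--
-- def motion_state(attributes):
--     if not attributes:
--         return "parked"
--     best = (8, "other")
--     for a in attributes:
--         cand = _RANKS.get(a.lower(), (8, "other"))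
--         if cand[0] < best[0]:
--             best = cand
--     return best[1]
-- ===== Notes on version B (the rewrite author's own statement) =====
-- stated objective: alternative
-- what changed: Replaced the build-a-set-then-8-membership-tests if-chain by a rank table (key -> (priority, label)) and a single min-rank fold over the attributes, returning the best label found.
import Mathlib
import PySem

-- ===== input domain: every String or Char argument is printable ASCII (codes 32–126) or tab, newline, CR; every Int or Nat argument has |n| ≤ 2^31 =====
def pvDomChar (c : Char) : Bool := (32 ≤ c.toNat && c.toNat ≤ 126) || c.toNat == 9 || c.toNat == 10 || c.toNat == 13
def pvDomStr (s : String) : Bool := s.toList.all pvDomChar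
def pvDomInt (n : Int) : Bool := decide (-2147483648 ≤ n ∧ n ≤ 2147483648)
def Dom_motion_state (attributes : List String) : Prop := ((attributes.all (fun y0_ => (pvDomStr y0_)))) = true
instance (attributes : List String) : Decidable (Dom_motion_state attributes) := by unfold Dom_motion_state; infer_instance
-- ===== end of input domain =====

-- B replaces A's set-then-membership-chain by a rank table and one min-rank fold (objective: alternative).

-- ===== PORT A =====
def motion_state (attributes : List String) : String :=
  if attributes = [] then "parked"
  else
    let atts : PySem.Set String := PySem.Set.ofList (attributes.map PySem.Str.lower)
    if PySem.Set.contains atts "vehicle.moving" then "moving"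
    else if PySem.Set.contains atts "vehicle.stopped" then "stopped"
    else if PySem.Set.contains atts "vehicle.parked" then "parked"
    else if PySem.Set.contains atts "cycle.with_rider" then "with_rider"
    else if PySem.Set.contains atts "cycle.without_rider" then "without_rider"
    else if PySem.Set.contains atts "pedestrian.moving" then "moving"
    else if PySem.Set.contains atts "pedestrian.sitting_lying_down" then "sitting_lying_down"
    else if PySem.Set.contains atts "pedestrian.standing" then "standing"
    else "other"

-- ===== PORT B =====
-- the static dict _RANKS of Source B, as a first-match lookup with default (8, "other")
def msRank (a : String) : Nat × String :=
  if a = "vehicle.moving" then (0, "moving")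
  else if a = "vehicle.stopped" then (1, "stopped")
  else if a = "vehicle.parked" then (2, "parked")
  else if a = "cycle.with_rider" then (3, "with_rider")
  else if a = "cycle.without_rider" then (4, "without_rider")
  else if a = "pedestrian.moving" then (5, "moving")
  else if a = "pedestrian.sitting_lying_down" then (6, "sitting_lying_down")
  else if a = "pedestrian.standing" then (7, "standing")
  else (8, "other")

def motion_state_alt (attributes : List String) : String :=
  if attributes = [] then "parked"
  else
    (attributes.foldl
      (fun best a =>
        let cand := msRank (PySem.Str.lower a)
        if cand.1 < best.1 then cand else best)
      (8, "other")).2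

-- ===== PRECONDITION & SPEC =====
def Spec_motion_state (attributes : List String) (out : String) : Prop := out = motion_state_alt attributes
instance (attributes : List String) (out : String) : Decidable (Spec_motion_state attributes out) := by unfold Spec_motion_state; infer_instance

-- ===== CLAIM (what is proved, stated in full; the proofs are below) =====
def Claim_equal_motion_state : Prop := ∀ (attributes : List String), Dom_motion_state attributes → Spec_motion_state attributes (motion_state attributes)

-- ===== LEMMAS AND PROOFS =====

-- B's fold over an already-lowered list
def msFold (l : List String) (b : Nat × String) : Nat × String :=
  l.foldl (fun best a => if (msRank a).1 < best.1 then msRank a else best) b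

theorem msFold_cons (a : String) (t : List String) (b : Nat × String) :
    msFold (a :: t) b = msFold t (if (msRank a).1 < b.1 then msRank a else b) := by
  simp [msFold, List.foldl]

theorem msFold_fst_le (l : List String) (b : Nat × String) : (msFold l b).1 ≤ b.1 := by
  induction l generalizing b with
  | nil => simp [msFold]
  | cons a t ih =>
    rw [msFold_cons]
    split
    · exact le_trans (ih _) (le_of_lt (by assumption))
    · exact ih b

theorem msFold_eq_or (l : List String) (b : Nat × String) :
    msFold l b = b ∨ ∃ a ∈ l, msFold l b = msRank a := by
  induction l generalizing b with
  | nil => left; rfl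
  | cons a t ih =>
    rw [msFold_cons]
    split
    · rcases ih (msRank a) with h | ⟨x, hx, h⟩
      · right; exact ⟨a, by simp, h⟩
      · right; exact ⟨x, by simp [hx], h⟩
    · rcases ih b with h | ⟨x, hx, h⟩
      · left; exact h
      · right; exact ⟨x, by simp [hx], h⟩

theorem msFold_le_mem (l : List String) (b : Nat × String) (a : String) (ha : a ∈ l) :
    (msFold l b).1 ≤ (msRank a).1 := by
  induction l generalizing b with
  | nil => cases ha
  | cons x t ih =>
    rw [msFold_cons]
    rcases List.mem_cons.mp ha with rfl | ha'
    · split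
      · exact msFold_fst_le _ _
      · exact le_trans (msFold_fst_le _ _) (by omega)
    · exact ih _ ha'

theorem msRank_k0 : msRank "vehicle.moving" = (0, "moving") := by decide
theorem msRank_k1 : msRank "vehicle.stopped" = (1, "stopped") := by decide
theorem msRank_k2 : msRank "vehicle.parked" = (2, "parked") := by decide
theorem msRank_k3 : msRank "cycle.with_rider" = (3, "with_rider") := by decide
theorem msRank_k4 : msRank "cycle.without_rider" = (4, "without_rider") := by decide
theorem msRank_k5 : msRank "pedestrian.moving" = (5, "moving") := by decide
theorem msRank_k6 : msRank "pedestrian.sitting_lying_down" = (6, "sitting_lying_down") := by decide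
theorem msRank_k7 : msRank "pedestrian.standing" = (7, "standing") := by decide

-- the membership chain over the lowered list equals the label of the minimum rank
theorem chain_eq (ml : List String) :
    (if "vehicle.moving" ∈ ml then "moving"
     else if "vehicle.stopped" ∈ ml then "stopped"
     else if "vehicle.parked" ∈ ml then "parked"
     else if "cycle.with_rider" ∈ ml then "with_rider"
     else if "cycle.without_rider" ∈ ml then "without_rider"
     else if "pedestrian.moving" ∈ ml then "moving"
     else if "pedestrian.sitting_lying_down" ∈ ml then "sitting_lying_down"
     else if "pedestrian.standing" ∈ ml then "standing"
     else "other") = (msFold ml (8, "other")).2 := by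
  set m := msFold ml (8, "other") with hm
  have hn0 : 0 < m.1 → "vehicle.moving" ∉ ml := fun h hmem => by
    have := msFold_le_mem ml (8, "other") _ hmem; rw [← hm, msRank_k0] at this; simp at this; omega
  have hn1 : 1 < m.1 → "vehicle.stopped" ∉ ml := fun h hmem => by
    have := msFold_le_mem ml (8, "other") _ hmem; rw [← hm, msRank_k1] at this; simp at this; omega
  have hn2 : 2 < m.1 → "vehicle.parked" ∉ ml := fun h hmem => by
    have := msFold_le_mem ml (8, "other") _ hmem; rw [← hm, msRank_k2] at this; simp at this; omega
  have hn3 : 3 < m.1 → "cycle.with_rider" ∉ ml := fun h hmem => by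
    have := msFold_le_mem ml (8, "other") _ hmem; rw [← hm, msRank_k3] at this; simp at this; omega
  have hn4 : 4 < m.1 → "cycle.without_rider" ∉ ml := fun h hmem => by
    have := msFold_le_mem ml (8, "other") _ hmem; rw [← hm, msRank_k4] at this; simp at this; omega
  have hn5 : 5 < m.1 → "pedestrian.moving" ∉ ml := fun h hmem => by
    have := msFold_le_mem ml (8, "other") _ hmem; rw [← hm, msRank_k5] at this; simp at this; omega
  have hn6 : 6 < m.1 → "pedestrian.sitting_lying_down" ∉ ml := fun h hmem => by
    have := msFold_le_mem ml (8, "other") _ hmem; rw [← hm, msRank_k6] at this; simp at this; omega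
  have hn7 : 7 < m.1 → "pedestrian.standing" ∉ ml := fun h hmem => by
    have := msFold_le_mem ml (8, "other") _ hmem; rw [← hm, msRank_k7] at this; simp at this; omega
  have hcases := msFold_eq_or ml (8, "other")
  rw [← hm] at hcases
  rcases hcases with h8 | ⟨a, ha, hEq⟩
  · rw [h8]
    have h8f : (8 : Nat) = m.1 := by rw [h8]
    simp [hn0 (by omega), hn1 (by omega), hn2 (by omega), hn3 (by omega),
          hn4 (by omega), hn5 (by omega), hn6 (by omega), hn7 (by omega)]
  · unfold msRank at hEq
    split_ifs at hEq with h0 h1 h2 h3 h4 h5 h6 h7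
    · subst h0; rw [hEq]; simp [ha]
    · subst h1; rw [hEq]
      simp [ha, hn0 (by rw [hEq]; decide)]
    · subst h2; rw [hEq]
      simp [ha, hn0 (by rw [hEq]; decide), hn1 (by rw [hEq]; decide)]
    · subst h3; rw [hEq]
      simp [ha, hn0 (by rw [hEq]; decide), hn1 (by rw [hEq]; decide), hn2 (by rw [hEq]; decide)]
    · subst h4; rw [hEq]
      simp [ha, hn0 (by rw [hEq]; decide), hn1 (by rw [hEq]; decide), hn2 (by rw [hEq]; decide), hn3 (by rw [hEq]; decide)]
    · subst h5; rw [hEq]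
      simp [ha, hn0 (by rw [hEq]; decide), hn1 (by rw [hEq]; decide), hn2 (by rw [hEq]; decide), hn3 (by rw [hEq]; decide),
            hn4 (by rw [hEq]; decide)]
    · subst h6; rw [hEq]
      simp [ha, hn0 (by rw [hEq]; decide), hn1 (by rw [hEq]; decide), hn2 (by rw [hEq]; decide), hn3 (by rw [hEq]; decide),
            hn4 (by rw [hEq]; decide), hn5 (by rw [hEq]; decide)]
    · subst h7; rw [hEq]
      simp [ha, hn0 (by rw [hEq]; decide), hn1 (by rw [hEq]; decide), hn2 (by rw [hEq]; decide), hn3 (by rw [hEq]; decide),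
            hn4 (by rw [hEq]; decide), hn5 (by rw [hEq]; decide), hn6 (by rw [hEq]; decide)]
    · rw [hEq]
      simp [hn0 (by rw [hEq]; decide), hn1 (by rw [hEq]; decide), hn2 (by rw [hEq]; decide), hn3 (by rw [hEq]; decide),
            hn4 (by rw [hEq]; decide), hn5 (by rw [hEq]; decide), hn6 (by rw [hEq]; decide), hn7 (by rw [hEq]; decide)]

-- ===== VERDICT (by name: the statement is the Claim_ definition above) =====
theorem motion_state_spec : Claim_equal_motion_state := by
  intro attributes _
  unfold Spec_motion_state motion_state motion_state_alt
  by_cases hnil : attributes = []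
  · simp [hnil]
  · simp only [hnil, if_false]
    have hfold : attributes.foldl
        (fun best a =>
          let cand := msRank (PySem.Str.lower a)
          if cand.1 < best.1 then cand else best) (8, "other")
        = msFold (attributes.map PySem.Str.lower) (8, "other") := by
      rw [msFold, List.foldl_map]
    rw [hfold]
    have hcont : ∀ s : String,
        PySem.Set.contains (PySem.Set.ofList (attributes.map PySem.Str.lower)) s
          = decide (s ∈ attributes.map PySem.Str.lower) := by
      intro s
      by_cases h : s ∈ attributes.map PySem.Str.lower <;> simp [h]
    simp only [hcont, decide_eq_true_eq]
    exact chain_eq (attributes.map PySem.Str.lower)
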